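-- pv_equiv track=rewrite | github.com/xgarrido/zsh-dotfiles | dotfiles/config/tint2/qsurvey.py | parse_condor
-- ===== SOURCE A (Python) =====
-- def parse_condor(result):
--     r, qw = 0, 0
--     status_map = {
--         1: "Idle",
--         2: "Running",
--         3: "Removed",
--         4: "Completed",
--         5: "Held",
--         6: "Transferring",
--         7: "Suspended",
--     }
--     for status in result:
--         try:
--             status = int(status)
--         except:
--             continue
--         if status == 2:
--             r += 1
--         elif status in [1, 5]:
--             qw += 1
--     return r, qw, r + qw
-- ===== SOURCE B (Python) =====
-- def parse_condor(result):
--     vals = []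
--     for status in result:
--         try:
--             vals.append(int(status))
--         except:
--             pass
--     r = vals.count(2)
--     qw = vals.count(1) + vals.count(5)
--     return r, qw, r + qw
-- ===== Notes on version B (the rewrite author's own statement) =====
-- stated objective: idiomatic
-- what changed: Replaces the in-loop if/elif counting with a parse-then-count structure: first collect all successfully parsed ints into a list, then read off the three totals with list.count passes.
import Mathlib
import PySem

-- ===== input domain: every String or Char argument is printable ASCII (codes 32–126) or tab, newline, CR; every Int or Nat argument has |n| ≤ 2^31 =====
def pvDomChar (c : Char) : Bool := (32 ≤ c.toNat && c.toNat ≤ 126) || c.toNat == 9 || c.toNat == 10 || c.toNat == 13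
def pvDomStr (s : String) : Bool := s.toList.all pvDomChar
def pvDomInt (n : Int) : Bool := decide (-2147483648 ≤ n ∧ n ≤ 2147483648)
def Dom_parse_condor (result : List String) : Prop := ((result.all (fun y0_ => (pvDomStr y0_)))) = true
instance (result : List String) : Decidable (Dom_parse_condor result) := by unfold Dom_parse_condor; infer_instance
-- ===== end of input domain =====

-- B replaces the in-loop if/elif counting by a parse-then-count structure (collect parsed ints, then count 2 / 1 / 5); idiomatic, same cost.


-- ===== PORT A =====
def parse_condor (result : List String) : Int × Int × Int :=
  let st := result.foldl (fun (acc : Int × Int) status =>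
    match PySem.Int.ofStr? status with
    | none => acc
    | some s =>
      if s == 2 then (acc.1 + 1, acc.2)
      else if s == 1 || s == 5 then (acc.1, acc.2 + 1)
      else acc) (0, 0)
  (st.1, st.2, st.1 + st.2)

-- ===== PORT B =====
def parse_condor_alt (result : List String) : Int × Int × Int :=
  let vals := result.filterMap PySem.Int.ofStr?
  let r : Int := (vals.count 2 : Int)
  let qw : Int := (vals.count 1 : Int) + (vals.count 5 : Int)
  (r, qw, r + qw)

-- ===== PRECONDITION & SPEC =====
def Spec_parse_condor (result : List String) (out : Int × Int × Int) : Prop := out = parse_condor_alt result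
instance (result : List String) (out : Int × Int × Int) : Decidable (Spec_parse_condor result out) := by unfold Spec_parse_condor; infer_instance

-- ===== CLAIM (what is proved, stated in full; the proofs are below) =====
def Claim_equal_parse_condor : Prop := ∀ (result : List String), Dom_parse_condor result → Spec_parse_condor result (parse_condor result)

-- ===== LEMMAS AND PROOFS =====
theorem parse_condor_loop (l : List String) (a b : Int) :
    l.foldl (fun (acc : Int × Int) status =>
      match PySem.Int.ofStr? status with
      | none => acc
      | some s =>
        if s == 2 then (acc.1 + 1, acc.2)
        else if s == 1 || s == 5 then (acc.1, acc.2 + 1)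
        else acc) (a, b)
    = (a + ((l.filterMap PySem.Int.ofStr?).count 2 : Int),
       b + ((l.filterMap PySem.Int.ofStr?).count 1 : Int)
         + ((l.filterMap PySem.Int.ofStr?).count 5 : Int)) := by
  induction l generalizing a b with
  | nil => simp
  | cons x xs ih =>
    rw [List.foldl_cons, List.filterMap_cons]
    cases h : PySem.Int.ofStr? x with
    | none => exact ih a b
    | some s =>
      show List.foldl (fun (acc : Int × Int) status =>
      match PySem.Int.ofStr? status with
      | none => acc
      | some s =>
        if s == 2 then (acc.1 + 1, acc.2)
        else if s == 1 || s == 5 then (acc.1, acc.2 + 1)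
        else acc)
          (if (s == 2) = true then ((a : Int) + 1, b)
           else if (s == 1 || s == 5) = true then (a, b + 1) else (a, b)) xs
        = (a + (((s :: xs.filterMap PySem.Int.ofStr?)).count 2 : Int),
           b + (((s :: xs.filterMap PySem.Int.ofStr?)).count 1 : Int)
             + (((s :: xs.filterMap PySem.Int.ofStr?)).count 5 : Int))
      split_ifs with hA hB
      · have h2 : s = 2 := by simpa using hA
        subst h2; rw [ih]; simp; omega
      · have h15 : s = 1 ∨ s = 5 := by simpa using hB
        rcases h15 with h1 | h1 <;>
          (subst h1; rw [ih]; simp; omega)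
      · have h2 : s ≠ 2 := by simpa using hA
        have h15 : s ≠ 1 ∧ s ≠ 5 := by
          constructor <;> (intro hx; exact hB (by simp [hx]))
        rw [ih]
        simp [h2, h15.1, h15.2]

-- ===== VERDICT (by name: the statement is the Claim_ definition above) =====
theorem parse_condor_spec : Claim_equal_parse_condor := by
  intro result _
  show parse_condor result = parse_condor_alt result
  unfold parse_condor parse_condor_alt
  rw [parse_condor_loop]
  simp
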